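-- pv_equiv track=rewrite | github.com/arcorck/DUT-AS | algo-progra/td3/exo3.py | renversement
-- ===== SOURCE A (Python) =====
-- def renversement(mot):
--     """cette fonction prend un mot et echange les lettres 2 par 2 (info --> niof)
--     parametre : mot : mot sur lequel la fonction est testée"""
--     res = ""
--     cpt = 0
--     if len(mot) != 0:
--         while cpt < len(mot)-1 :
--             res += mot[cpt+1]
--             res += mot[cpt]
--             cpt += 2
--         if cpt < len (mot) :
--             res += mot[cpt]
--     return res
-- ===== SOURCE B (Python) =====
-- def renversement(mot):
--     """cette fonction prend un mot et echange les lettres 2 par 2 (info --> niof)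
--     parametre : mot : mot sur lequel la fonction est testée"""
--     out = []
--     pending = None
--     for c in mot:
--         if pending is None:
--             pending = c
--         else:
--             out.append(c)
--             out.append(pending)
--             pending = None
--     if pending is not None:
--         out.append(pending)
--     return ''.join(out)
-- ===== Notes on version B (the rewrite author's own statement) =====
-- stated objective: faster
-- what changed: Replaces the index-counter while loop that grows the result by quadratic string concatenation with a single pass over the characters holding one pending character, collecting pieces into a list joined once at the end.
import Mathlib
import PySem

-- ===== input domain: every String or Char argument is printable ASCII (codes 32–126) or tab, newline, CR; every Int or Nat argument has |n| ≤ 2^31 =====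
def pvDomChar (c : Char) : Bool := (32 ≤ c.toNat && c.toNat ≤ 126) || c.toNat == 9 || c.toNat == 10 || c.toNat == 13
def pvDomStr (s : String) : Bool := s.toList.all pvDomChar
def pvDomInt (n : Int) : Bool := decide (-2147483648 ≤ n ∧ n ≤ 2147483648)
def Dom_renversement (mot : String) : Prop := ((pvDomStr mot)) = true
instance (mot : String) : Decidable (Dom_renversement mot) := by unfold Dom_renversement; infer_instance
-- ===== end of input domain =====

-- B swaps letters pairwise with a single pass holding one pending character, instead of A's index-counter while loop.

-- ===== PORT A =====
-- the while loop: while cpt < len(mot)-1: res += mot[cpt+1]; res += mot[cpt]; cpt += 2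
-- then: if cpt < len(mot): res += mot[cpt]   (indices are always in range here, so getD is exact)
def renvLoopA (l : List Char) (res : List Char) (cpt : Nat) : List Char :=
  if cpt < l.length - 1 then
    renvLoopA l (res ++ [l.getD (cpt + 1) ' '] ++ [l.getD cpt ' ']) (cpt + 2)
  else if cpt < l.length then res ++ [l.getD cpt ' ']
  else res
termination_by l.length - cpt

def renversement (mot : String) : String :=
  let l := mot.toList
  String.ofList (if l.length ≠ 0 then renvLoopA l [] 0 else [])

-- ===== PORT B =====
-- Source B's loop body: pending empty -> hold c; otherwise emit c then the held character
def stepB (st : List Char × Option Char) (c : Char) : List Char × Option Char :=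
  match st.2 with
  | none => (st.1, some c)
  | some p => (st.1 ++ [c] ++ [p], none)

-- Source B: fold the loop over the characters, then flush the pending character if any, ''.join
def renversement_alt (mot : String) : String :=
  let fin := mot.toList.foldl stepB ([], none)
  String.ofList (match fin.2 with | none => fin.1 | some p => fin.1 ++ [p])

-- ===== PRECONDITION & SPEC =====
def Spec_renversement (mot : String) (out : String) : Prop := out = renversement_alt mot
instance (mot : String) (out : String) : Decidable (Spec_renversement mot out) := by unfold Spec_renversement; infer_instance

-- ===== CLAIM (what is proved, stated in full; the proofs are below) =====
def Claim_equal_renversement : Prop := ∀ (mot : String), Dom_renversement mot → Spec_renversement mot (renversement mot)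

-- ===== LEMMAS AND PROOFS =====
-- proof-side characterisation: swap the characters two by two
def swapPairs : List Char → List Char
  | [] => []
  | [a] => [a]
  | a :: b :: rest => b :: a :: swapPairs rest

-- A's loop invariant: from index cpt the loop appends exactly swapPairs of the remaining suffix
theorem renvLoopA_eq_aux (l : List Char) (n : Nat) : ∀ (cpt : Nat) (res : List Char),
    l.length - cpt ≤ n → renvLoopA l res cpt = res ++ swapPairs (l.drop cpt) := by
  induction n with
  | zero =>
    intro cpt res hn
    rw [renvLoopA, if_neg (by omega), if_neg (by omega),
      List.drop_eq_nil_of_le (by omega), swapPairs, List.append_nil]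
  | succ n ih =>
    intro cpt res hn
    rw [renvLoopA]
    by_cases h1 : cpt < l.length - 1
    · have hlen : cpt + 1 < l.length := by omega
      have hc : cpt < l.length := by omega
      rw [if_pos h1, ih (cpt + 2) _ (by omega)]
      have hdrop : l.drop cpt = l[cpt] :: l[cpt + 1] :: l.drop (cpt + 2) := by
        rw [List.drop_eq_getElem_cons hc, List.drop_eq_getElem_cons hlen]
      rw [hdrop, swapPairs, List.getD_eq_getElem l ' ' hlen, List.getD_eq_getElem l ' ' hc]
      simp
    · rw [if_neg h1]
      by_cases h2 : cpt < l.length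
      · have hdrop : l.drop cpt = [l[cpt]] := by
          rw [List.drop_eq_getElem_cons h2]
          have : l.drop (cpt + 1) = [] := List.drop_eq_nil_of_le (by omega)
          rw [this]
        rw [if_pos h2, hdrop, swapPairs, List.getD_eq_getElem l ' ' h2]
      · rw [if_neg h2, List.drop_eq_nil_of_le (by omega), swapPairs, List.append_nil]

theorem renvLoopA_eq (l : List Char) (res : List Char) :
    renvLoopA l res 0 = res ++ swapPairs l := by
  have := renvLoopA_eq_aux l l.length 0 res (by omega)
  simpa using this

-- B's fold invariant: from an empty pending slot the pass produces swapPairs of the rest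
theorem foldB_eq (l : List Char) : ∀ (out : List Char),
    (match (l.foldl stepB (out, none)).2 with
      | none => (l.foldl stepB (out, none)).1
      | some p => (l.foldl stepB (out, none)).1 ++ [p]) = out ++ swapPairs l := by
  induction l using swapPairs.induct with
  | case1 => intro out; simp [swapPairs]
  | case2 a => intro out; simp [swapPairs, stepB]
  | case3 a b rest ih =>
    intro out
    have hstep : ((a :: b :: rest).foldl stepB (out, none))
        = rest.foldl stepB (out ++ [b] ++ [a], none) := by
      simp [List.foldl, stepB]
    rw [hstep, ih (out ++ [b] ++ [a]), swapPairs]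
    simp

-- ===== VERDICT (by name: the statement is the Claim_ definition above) =====
theorem renversement_spec : Claim_equal_renversement := by
  intro mot _
  unfold Spec_renversement renversement renversement_alt
  dsimp only
  rw [foldB_eq mot.toList [], List.nil_append]
  by_cases h : mot.toList.length ≠ 0
  · rw [if_pos h, renvLoopA_eq, List.nil_append]
  · rw [if_neg h]
    have : mot.toList = [] := List.eq_nil_of_length_eq_zero (by omega)
    rw [this]; rfl
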